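-- pv_equiv track=rewrite | github.com/yasidew/Codeharbor-2.0 | Drinks/complexity_calculator.py | calculate_complexity_factors
-- ===== SOURCE A (Python) =====
-- def calculate_complexity_factors(filename, data):
--     total_size = 0
--     total_control_structure_complexity = 0
--     total_nesting_level = 0
--     total_inheritance_level = 0
--     total_compound_condition_weight = 0
--     total_try_catch_weight = 0
--     total_thread_weight = 0
--     total_cbo_weight = 0
--     # total_mpc_weight = 0
--
--     for line in data:
--         total_size += line[2]
--         total_control_structure_complexity += line[4]
--         total_nesting_level += line[5]
--         total_inheritance_level += line[6]
--         total_compound_condition_weight += line[7]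
--         total_try_catch_weight += line[8]
--         total_thread_weight += line[9]
--         total_cbo_weight += line[10]
--         # total_mpc_weight += line[11]
--
--     return {
--         'Size': total_size,
--         'Control Structure Complexity': total_control_structure_complexity,
--         'Nesting Level': total_nesting_level,
--         'Inheritance Level': total_inheritance_level,
--         'Compound Condition Weight': total_compound_condition_weight,
--         'Try-Catch Weight': total_try_catch_weight,
--         'Thread Weight': total_thread_weight,
--         'CBO': total_cbo_weight,
--         # 'MPC': total_mpc_weight
--     }
-- ===== SOURCE B (Python) =====
-- COLUMNS = [
--     ('Size', 2),
--     ('Control Structure Complexity', 4),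
--     ('Nesting Level', 5),
--     ('Inheritance Level', 6),
--     ('Compound Condition Weight', 7),
--     ('Try-Catch Weight', 8),
--     ('Thread Weight', 9),
--     ('CBO', 10),
-- ]
--
-- def calculate_complexity_factors(filename, data):
--     return {label: sum(line[idx] for line in data) for label, idx in COLUMNS}
-- ===== Notes on version B (the rewrite author's own statement) =====
-- stated objective: simpler
-- what changed: Replaces the single row-major pass with eight named accumulators by a label-to-column table and a column-major dict comprehension, one sum per output label.
import Mathlib
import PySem

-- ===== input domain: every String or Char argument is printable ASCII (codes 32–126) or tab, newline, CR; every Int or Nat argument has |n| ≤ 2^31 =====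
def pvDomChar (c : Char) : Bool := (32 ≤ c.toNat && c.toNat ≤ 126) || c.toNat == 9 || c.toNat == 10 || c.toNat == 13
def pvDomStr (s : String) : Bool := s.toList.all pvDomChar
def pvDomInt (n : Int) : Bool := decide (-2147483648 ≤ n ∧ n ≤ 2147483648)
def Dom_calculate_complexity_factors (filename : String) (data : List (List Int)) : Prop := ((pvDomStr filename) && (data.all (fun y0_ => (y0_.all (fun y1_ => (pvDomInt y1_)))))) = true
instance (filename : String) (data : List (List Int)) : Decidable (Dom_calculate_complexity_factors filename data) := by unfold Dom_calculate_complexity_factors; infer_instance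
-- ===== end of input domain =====

-- B replaces the single row-major pass with eight named accumulators by a label→column table
-- and one column-major sum per output label (objective: simpler).


-- ===== PORT A =====
-- line[i] under Pre_ every index is in range; default 0 is never reached inside Pre_
def pvGetA (line : List Int) (i : Int) : Int := (PySem.List.pyGet? line i).getD 0

def calculate_complexity_factors (filename : String) (data : List (List Int)) : List (String × Int) :=
  let st := data.foldl
    (fun (t : Int × Int × Int × Int × Int × Int × Int × Int) line =>
      (t.1 + pvGetA line 2,
       t.2.1 + pvGetA line 4,
       t.2.2.1 + pvGetA line 5,
       t.2.2.2.1 + pvGetA line 6,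
       t.2.2.2.2.1 + pvGetA line 7,
       t.2.2.2.2.2.1 + pvGetA line 8,
       t.2.2.2.2.2.2.1 + pvGetA line 9,
       t.2.2.2.2.2.2.2 + pvGetA line 10))
    (0, 0, 0, 0, 0, 0, 0, 0)
  [("Size", st.1),
   ("Control Structure Complexity", st.2.1),
   ("Nesting Level", st.2.2.1),
   ("Inheritance Level", st.2.2.2.1),
   ("Compound Condition Weight", st.2.2.2.2.1),
   ("Try-Catch Weight", st.2.2.2.2.2.1),
   ("Thread Weight", st.2.2.2.2.2.2.1),
   ("CBO", st.2.2.2.2.2.2.2)]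

-- ===== PORT B =====
def pvColumns : List (String × Int) :=
  [("Size", 2),
   ("Control Structure Complexity", 4),
   ("Nesting Level", 5),
   ("Inheritance Level", 6),
   ("Compound Condition Weight", 7),
   ("Try-Catch Weight", 8),
   ("Thread Weight", 9),
   ("CBO", 10)]

-- sum(line[idx] for line in data); default 0 is never reached inside Pre_
def pvColSum (data : List (List Int)) (idx : Int) : Int :=
  data.foldl (fun s line => s + (PySem.List.pyGet? line idx).getD 0) 0

def calculate_complexity_factors_alt (filename : String) (data : List (List Int)) : List (String × Int) :=
  pvColumns.map (fun p => (p.1, pvColSum data p.2))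

-- ===== PRECONDITION & SPEC =====
-- Pre_ excludes rows shorter than 11 entries, on which both Pythons raise IndexError.
def Pre_calculate_complexity_factors (filename : String) (data : List (List Int)) : Prop :=
  ∀ line ∈ data, 11 ≤ line.length

instance (filename : String) (data : List (List Int)) : Decidable (Pre_calculate_complexity_factors filename data) := by unfold Pre_calculate_complexity_factors; infer_instance

def pvWitness_calculate_complexity_factors : String × List (List Int) :=
  ("f.py", [[0, 1, 2, 3, 4, 5, 6, 7, 8, 9, 10], [1, 1, 1, 1, 1, 1, 1, 1, 1, 1, 1]])

def Spec_calculate_complexity_factors (filename : String) (data : List (List Int)) (out : List (String × Int)) : Prop := out = calculate_complexity_factors_alt filename data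
instance (filename : String) (data : List (List Int)) (out : List (String × Int)) : Decidable (Spec_calculate_complexity_factors filename data out) := by unfold Spec_calculate_complexity_factors; infer_instance

-- ===== CLAIM (what is proved, stated in full; the proofs are below) =====
def Claim_equal_calculate_complexity_factors : Prop := ∀ (filename : String) (data : List (List Int)), Dom_calculate_complexity_factors filename data → Pre_calculate_complexity_factors filename data → Spec_calculate_complexity_factors filename data (calculate_complexity_factors filename data)

-- ===== LEMMAS AND PROOFS =====

-- B's column sum over hd :: tl starts from hd's entry.
theorem pvColSum_shift (i : Int) (xs : List (List Int)) (s : Int) :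
    xs.foldl (fun s line => s + (PySem.List.pyGet? line i).getD 0) s = s + pvColSum xs i := by
  induction xs generalizing s with
  | nil => simp [pvColSum]
  | cons x xs ih =>
      rw [List.foldl_cons, ih]
      conv_rhs => rw [pvColSum, List.foldl_cons, ih]
      ring

theorem pvColSum_cons (hd : List Int) (tl : List (List Int)) (i : Int) :
    pvColSum (hd :: tl) i = pvGetA hd i + pvColSum tl i := by
  conv_lhs => rw [pvColSum, List.foldl_cons]
  rw [pvColSum_shift]
  simp [pvGetA]

-- A's eight-accumulator fold computes, componentwise, the eight column sums of B.
theorem pv_fold_eq (data : List (List Int))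
    (a b c d e f g h : Int) :
    data.foldl
      (fun (t : Int × Int × Int × Int × Int × Int × Int × Int) line =>
        (t.1 + pvGetA line 2,
         t.2.1 + pvGetA line 4,
         t.2.2.1 + pvGetA line 5,
         t.2.2.2.1 + pvGetA line 6,
         t.2.2.2.2.1 + pvGetA line 7,
         t.2.2.2.2.2.1 + pvGetA line 8,
         t.2.2.2.2.2.2.1 + pvGetA line 9,
         t.2.2.2.2.2.2.2 + pvGetA line 10))
      (a, b, c, d, e, f, g, h)
    = (a + pvColSum data 2, b + pvColSum data 4, c + pvColSum data 5,
       d + pvColSum data 6, e + pvColSum data 7, f + pvColSum data 8,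
       g + pvColSum data 9, h + pvColSum data 10) := by
  induction data generalizing a b c d e f g h with
  | nil => simp [pvColSum]
  | cons hd tl ih =>
      simp only [List.foldl_cons]
      rw [ih]
      simp only [pvColSum_cons, add_assoc]

-- ===== VERDICT (by name: the statement is the Claim_ definition above) =====
theorem calculate_complexity_factors_spec : Claim_equal_calculate_complexity_factors := by
  intro filename data _ _
  unfold Spec_calculate_complexity_factors calculate_complexity_factors calculate_complexity_factors_alt
  rw [pv_fold_eq]
  simp [pvColumns]
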